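-- pv_equiv track=rewrite | github.com/byronadriano/teacherfy-backend | resources/generators/slide_processor.py | are_terms_related
-- ===== SOURCE A (Python) =====
-- def are_terms_related(term1, term2):
--     """
--     Check if two terms are thematically related for content analysis.
--     """
--     # Define thematic relationships
--     related_groups = [
--         # Math/food combinations
--         {'pizza', 'fractions', 'slices', 'pie', 'cake', 'food'},
--         {'coins', 'money', 'dollars', 'cents', 'math'},
--         {'clock', 'time', 'hours', 'minutes'},
--
--         # Science themes
--         {'animals', 'ocean', 'fish', 'marine', 'water'},
--         {'plants', 'flowers', 'trees', 'garden', 'nature'},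
--         {'rainforest', 'ecosystem', 'species', 'oxygen', 'trees', 'animals'},
--         {'space', 'planets', 'sun', 'moon', 'stars', 'solar'},
--
--         # Social studies themes
--         {'maps', 'countries', 'globe', 'geography', 'earth'},
--         {'community', 'buildings', 'cities', 'neighborhoods'},
--
--         # Arts themes
--         {'music', 'instruments', 'piano', 'guitar', 'songs'},
--         {'art', 'painting', 'colors', 'brushes', 'canvas'},
--
--         # PE themes
--         {'sports', 'exercise', 'running', 'swimming', 'dancing'},
--         {'soccer', 'basketball', 'football', 'ball', 'games'}
--     ]
--
--     # Check if both terms belong to the same thematic group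
--     for group in related_groups:
--         if term1 in group and term2 in group:
--             return True
--
--     return False
-- ===== SOURCE B (Python) =====
-- # Thematic groups packed as one semicolon-separated string; an inverted index
-- # (word -> set of group ids) is built from it and the query is a disjointness test.
-- _THEMES = (
--     "pizza fractions slices pie cake food;"
--     "coins money dollars cents math;"
--     "clock time hours minutes;"
--     "animals ocean fish marine water;"
--     "plants flowers trees garden nature;"
--     "rainforest ecosystem species oxygen trees animals;"
--     "space planets sun moon stars solar;"
--     "maps countries globe geography earth;"
--     "community buildings cities neighborhoods;"
--     "music instruments piano guitar songs;"
--     "art painting colors brushes canvas;"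
--     "sports exercise running swimming dancing;"
--     "soccer basketball football ball games"
-- )
--
-- def are_terms_related(term1, term2):
--     """
--     Check if two terms are thematically related for content analysis.
--     """
--     index = {}
--     for i, segment in enumerate(_THEMES.split(';')):
--         for word in segment.split():
--             index.setdefault(word, set()).add(i)
--     return not index.get(term1, set()).isdisjoint(index.get(term2, set()))
-- ===== Notes on version B (the rewrite author's own statement) =====
-- stated objective: alternative
-- what changed: B stores the vocabulary as one packed semicolon-separated string, parses it once into an inverted index (word -> set of group ids) and answers by a disjointness test on the two index entries, instead of A's scan over thirteen set literals testing both memberships per group.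
import Mathlib
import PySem

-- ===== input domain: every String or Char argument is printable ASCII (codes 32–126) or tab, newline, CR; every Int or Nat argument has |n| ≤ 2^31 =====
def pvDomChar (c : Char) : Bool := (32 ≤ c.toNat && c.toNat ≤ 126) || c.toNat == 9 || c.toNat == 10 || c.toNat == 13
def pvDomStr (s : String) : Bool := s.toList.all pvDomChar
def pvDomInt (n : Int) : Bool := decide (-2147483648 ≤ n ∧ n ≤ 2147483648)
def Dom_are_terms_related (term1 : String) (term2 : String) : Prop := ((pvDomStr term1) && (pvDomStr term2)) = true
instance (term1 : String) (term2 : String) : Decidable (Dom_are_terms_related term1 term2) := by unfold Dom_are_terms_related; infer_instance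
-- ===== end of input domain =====

-- B packs the thematic vocabulary into one semicolon-separated string, builds an inverted
-- index (word -> set of group ids) from it, and answers by a disjointness test on the two
-- index entries, instead of A's scan over thirteen set literals (objective: alternative).

-- ===== PORT A =====
-- the 13 thematic set literals of A
def pvRelatedGroups : List (PySem.Set String) :=
  [ PySem.Set.ofList ["pizza", "fractions", "slices", "pie", "cake", "food"],
    PySem.Set.ofList ["coins", "money", "dollars", "cents", "math"],
    PySem.Set.ofList ["clock", "time", "hours", "minutes"],
    PySem.Set.ofList ["animals", "ocean", "fish", "marine", "water"],
    PySem.Set.ofList ["plants", "flowers", "trees", "garden", "nature"],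
    PySem.Set.ofList ["rainforest", "ecosystem", "species", "oxygen", "trees", "animals"],
    PySem.Set.ofList ["space", "planets", "sun", "moon", "stars", "solar"],
    PySem.Set.ofList ["maps", "countries", "globe", "geography", "earth"],
    PySem.Set.ofList ["community", "buildings", "cities", "neighborhoods"],
    PySem.Set.ofList ["music", "instruments", "piano", "guitar", "songs"],
    PySem.Set.ofList ["art", "painting", "colors", "brushes", "canvas"],
    PySem.Set.ofList ["sports", "exercise", "running", "swimming", "dancing"],
    PySem.Set.ofList ["soccer", "basketball", "football", "ball", "games"] ]

-- A's loop: 'for group in related_groups: if term1 in group and term2 in group: return True'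
def pvLoopA (term1 term2 : String) : List (PySem.Set String) → Bool
  | [] => false
  | g :: rest =>
      if PySem.Set.contains g term1 && PySem.Set.contains g term2 then true
      else pvLoopA term1 term2 rest

def are_terms_related (term1 : String) (term2 : String) : Bool :=
  pvLoopA term1 term2 pvRelatedGroups

-- ===== PORT B =====
-- B's module constant _THEMES (Source B): all groups packed into one string
def pvThemes : String :=
  "pizza fractions slices pie cake food;coins money dollars cents math;clock time hours minutes;animals ocean fish marine water;plants flowers trees garden nature;rainforest ecosystem species oxygen trees animals;space planets sun moon stars solar;maps countries globe geography earth;community buildings cities neighborhoods;music instruments piano guitar songs;art painting colors brushes canvas;sports exercise running swimming dancing;soccer basketball football ball games"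

-- 'for i, segment in enumerate(_THEMES.split(';')): for word in segment.split(): index.setdefault(word, set()).add(i)'
def pvIndexB : PySem.Dict String (PySem.Set Int) :=
  (PySem.List.enumerate (((PySem.Str.split? pvThemes ";").getD []).map PySem.Str.split₀)).foldl
    (fun d p =>
      p.2.foldl (fun d w => d.insert w (PySem.Set.add (d.getD w PySem.Set.empty) p.1)) d)
    PySem.Dict.empty

def are_terms_related_alt (term1 : String) (term2 : String) : Bool :=
  -- not index.get(term1, set()).isdisjoint(index.get(term2, set()))
  ! PySem.Set.isdisjoint (pvIndexB.getD term1 PySem.Set.empty) (pvIndexB.getD term2 PySem.Set.empty)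

-- ===== PRECONDITION & SPEC =====
def Spec_are_terms_related (term1 : String) (term2 : String) (out : Bool) : Prop := out = are_terms_related_alt term1 term2
instance (term1 : String) (term2 : String) (out : Bool) : Decidable (Spec_are_terms_related term1 term2 out) := by unfold Spec_are_terms_related; infer_instance

-- ===== CLAIM =====
def Claim_equal_are_terms_related : Prop := ∀ (term1 : String) (term2 : String), Dom_are_terms_related term1 term2 → Spec_are_terms_related term1 term2 (are_terms_related term1 term2)

-- ===== LEMMAS AND PROOFS =====

-- the word lists that B's string parsing produces (proved below to be what splitOn/split₀ compute)
def pvWordLists : List (List String) :=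
  [ ["pizza", "fractions", "slices", "pie", "cake", "food"],
    ["coins", "money", "dollars", "cents", "math"],
    ["clock", "time", "hours", "minutes"],
    ["animals", "ocean", "fish", "marine", "water"],
    ["plants", "flowers", "trees", "garden", "nature"],
    ["rainforest", "ecosystem", "species", "oxygen", "trees", "animals"],
    ["space", "planets", "sun", "moon", "stars", "solar"],
    ["maps", "countries", "globe", "geography", "earth"],
    ["community", "buildings", "cities", "neighborhoods"],
    ["music", "instruments", "piano", "guitar", "songs"],
    ["art", "painting", "colors", "brushes", "canvas"],
    ["sports", "exercise", "running", "swimming", "dancing"],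
    ["soccer", "basketball", "football", "ball", "games"] ]

set_option maxRecDepth 40000 in
set_option maxHeartbeats 2000000 in
theorem pv_parse : ((PySem.Str.split? pvThemes ";").getD []).map PySem.Str.split₀ = pvWordLists := by decide

theorem pv_groups_eq : pvRelatedGroups = pvWordLists.map PySem.Set.ofList := by decide

-- membership in the dict entry after the inner fold over one segment's words
theorem pv_inner_mem (ws : List String) (i j : Int) (t : String)
    (d : PySem.Dict String (PySem.Set Int)) :
    j ∈ (ws.foldl (fun d w => d.insert w (PySem.Set.add (d.getD w PySem.Set.empty) i)) d).getD t PySem.Set.empty ↔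
      j ∈ d.getD t PySem.Set.empty ∨ (j = i ∧ t ∈ ws) := by
  induction ws generalizing d with
  | nil => simp
  | cons x xs ih =>
      rw [List.foldl_cons, ih, PySem.Dict.getD_insert]
      by_cases hx : t = x
      · subst hx
        simp [PySem.Set.mem_add]
        tauto
      · simp [hx]

-- membership in the dict entry after the outer fold over the enumerated segments
theorem pv_outer_mem (ps : List (Int × List String)) (j : Int) (t : String)
    (d : PySem.Dict String (PySem.Set Int)) :
    j ∈ (ps.foldl
          (fun d p =>
            p.2.foldl (fun d w => d.insert w (PySem.Set.add (d.getD w PySem.Set.empty) p.1)) d)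
          d).getD t PySem.Set.empty ↔
      j ∈ d.getD t PySem.Set.empty ∨ ∃ p ∈ ps, p.1 = j ∧ t ∈ p.2 := by
  induction ps generalizing d with
  | nil => simp
  | cons q qs ih =>
      rw [List.foldl_cons, ih, pv_inner_mem]
      constructor
      · rintro ((h | ⟨rfl, ht⟩) | ⟨p, hp, h1, h2⟩)
        · exact Or.inl h
        · exact Or.inr ⟨q, List.mem_cons_self, rfl, ht⟩
        · exact Or.inr ⟨p, List.mem_cons_of_mem _ hp, h1, h2⟩
      · rintro (h | ⟨p, hp, h1, h2⟩)
        · exact Or.inl (Or.inl h)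
        · rcases List.mem_cons.mp hp with rfl | hp
          · exact Or.inl (Or.inr ⟨h1.symm, h2⟩)
          · exact Or.inr ⟨p, hp, h1, h2⟩

-- B's index entry of t holds exactly the ids of the word lists containing t
theorem pv_index_mem (j : Int) (t : String) :
    j ∈ pvIndexB.getD t PySem.Set.empty ↔
      ∃ p ∈ PySem.List.enumerate pvWordLists, p.1 = j ∧ t ∈ p.2 := by
  unfold pvIndexB
  rw [pv_parse, pv_outer_mem]
  simp [pysem, PySem.Set.empty]

-- same id in the enumeration names the same word list
theorem pv_enum_inj {gs : List (List String)} {p q : Int × List String}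
    (hp : p ∈ PySem.List.enumerate gs) (hq : q ∈ PySem.List.enumerate gs)
    (h : p.1 = q.1) : p = q := by
  rcases (PySem.List.mem_enumerate_iff gs 0 p).mp hp with ⟨k, hk, rfl⟩
  rcases (PySem.List.mem_enumerate_iff gs 0 q).mp hq with ⟨k', hk', rfl⟩
  simp only at h
  have hkk : k = k' := by omega
  subst hkk; rfl

-- A's scan returns true iff some group contains both terms
theorem pv_loopA_iff (term1 term2 : String) (gs : List (PySem.Set String)) :
    pvLoopA term1 term2 gs = true ↔ ∃ g ∈ gs, term1 ∈ g ∧ term2 ∈ g := by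
  induction gs with
  | nil => simp [pvLoopA]
  | cons g rest ih =>
      simp only [pvLoopA]
      by_cases h : (PySem.Set.contains g term1 && PySem.Set.contains g term2) = true
      · rw [if_pos h]
        simp only [Bool.and_eq_true, PySem.Set.contains_iff] at h
        exact ⟨fun _ => ⟨g, List.mem_cons_self, h⟩, fun _ => rfl⟩
      · rw [if_neg h, ih]
        simp only [Bool.and_eq_true, PySem.Set.contains_iff] at h
        constructor
        · rintro ⟨g', hg', hm⟩; exact ⟨g', List.mem_cons_of_mem _ hg', hm⟩
        · rintro ⟨g', hg', hm⟩
          rcases List.mem_cons.mp hg' with rfl | hg'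
          · exact absurd hm h
          · exact ⟨g', hg', hm⟩

theorem pv_eq (term1 term2 : String) :
    are_terms_related term1 term2 = are_terms_related_alt term1 term2 := by
  have hiff : (are_terms_related term1 term2 = true) ↔ (are_terms_related_alt term1 term2 = true) := by
    have hB : (are_terms_related_alt term1 term2 = true) ↔
        ∃ j ∈ pvIndexB.getD term1 PySem.Set.empty, j ∈ pvIndexB.getD term2 PySem.Set.empty := by
      unfold are_terms_related_alt
      rw [Bool.not_eq_true', ← Bool.not_eq_true, PySem.Set.isdisjoint_iff]
      simp only [not_forall, not_not]
      simp
    rw [hB]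
    unfold are_terms_related
    rw [pv_loopA_iff, pv_groups_eq]
    constructor
    · rintro ⟨g, hg, h1, h2⟩
      rcases List.mem_map.mp hg with ⟨wl, hwl, rfl⟩
      rcases List.getElem_of_mem hwl with ⟨k, hk, rfl⟩
      have hp : ((k : Int), pvWordLists[k]) ∈ PySem.List.enumerate pvWordLists :=
        (PySem.List.mem_enumerate_iff pvWordLists 0 _).mpr ⟨k, hk, by simp⟩
      rw [PySem.Set.mem_ofList] at h1 h2
      exact ⟨(k : Int), (pv_index_mem _ _).mpr ⟨_, hp, rfl, h1⟩,
             (pv_index_mem _ _).mpr ⟨_, hp, rfl, h2⟩⟩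
    · rintro ⟨j, hj1, hj2⟩
      rcases (pv_index_mem _ _).mp hj1 with ⟨p, hp, hp1, hp2⟩
      rcases (pv_index_mem _ _).mp hj2 with ⟨q, hq, hq1, hq2⟩
      have hpq : p = q := pv_enum_inj hp hq (hp1.trans hq1.symm)
      subst hpq
      have hpm : p.2 ∈ pvWordLists := by
        rcases (PySem.List.mem_enumerate_iff pvWordLists 0 p).mp hp with ⟨k, hk, rfl⟩
        exact List.getElem_mem hk
      exact ⟨PySem.Set.ofList p.2, List.mem_map_of_mem hpm,
             (PySem.Set.mem_ofList _ _).mpr hp2, (PySem.Set.mem_ofList _ _).mpr hq2⟩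
  exact Bool.eq_iff_iff.mpr hiff

-- ===== VERDICT =====
theorem are_terms_related_spec : Claim_equal_are_terms_related := by
  intro term1 term2 _
  exact pv_eq term1 term2
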